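-- pv_equiv track=rewrite | github.com/gen-comf/python_learning_journey | generation_python/module_2_projects/stepik_projects/01_guess_numbers/main.py | calculate_min_attempts
-- ===== SOURCE A (Python) =====
-- def calculate_min_attempts(n):
--     if n <= 1:
--         return 1
--
--     attempts = 0
--
--     while n > 0:
--         attempts += 1
--         n //= 2             # делим диапазон пополам
--
--     return attempts
-- ===== SOURCE B (Python) =====
-- def calculate_min_attempts(n):
--     if n <= 1:
--         return 1
--     return n.bit_length()
-- ===== Notes on version B (the rewrite author's own statement) =====
-- stated objective: idiomatic
-- what changed: Replaces the halving while-loop counting iterations with a single n.bit_length() builtin call (guarded by the unchanged n <= 1 base case).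
import Mathlib
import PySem

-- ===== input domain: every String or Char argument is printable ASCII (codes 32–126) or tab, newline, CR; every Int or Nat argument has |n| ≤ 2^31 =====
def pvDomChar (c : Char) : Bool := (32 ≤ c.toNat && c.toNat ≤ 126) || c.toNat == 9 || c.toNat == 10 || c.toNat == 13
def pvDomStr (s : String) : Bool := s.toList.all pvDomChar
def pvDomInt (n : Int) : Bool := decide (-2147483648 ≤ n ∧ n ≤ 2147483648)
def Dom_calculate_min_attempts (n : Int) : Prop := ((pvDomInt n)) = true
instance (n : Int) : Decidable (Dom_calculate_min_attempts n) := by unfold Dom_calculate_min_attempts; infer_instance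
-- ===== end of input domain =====

-- B replaces A's halving while-loop with the bit_length builtin (same n <= 1 guard), a more idiomatic O(1) formulation; speed gain not measured.


-- ===== PORT A =====
-- while n > 0: attempts += 1; n //= 2
def pvLoopA (n attempts : Int) : Int :=
  if h : n > 0 then pvLoopA (PySem.Int.floordiv n 2) (attempts + 1) else attempts
termination_by n.toNat
decreasing_by
  have h2 : PySem.Int.floordiv n 2 = n / 2 := PySem.Int.floordiv_eq_ediv_of_pos (by omega)
  rw [h2]; omega

def calculate_min_attempts (n : Int) : Int :=
  if n ≤ 1 then 1
  else pvLoopA n 0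

-- ===== PORT B =====
def calculate_min_attempts_alt (n : Int) : Int :=
  if n ≤ 1 then 1
  else (PySem.Int.bitLength n : Int)

-- ===== PRECONDITION & SPEC =====
def Spec_calculate_min_attempts (n : Int) (out : Int) : Prop := out = calculate_min_attempts_alt n
instance (n : Int) (out : Int) : Decidable (Spec_calculate_min_attempts n out) := by unfold Spec_calculate_min_attempts; infer_instance

-- ===== CLAIM (what is proved, stated in full; the proofs are below) =====
def Claim_equal_calculate_min_attempts : Prop := ∀ (n : Int), Dom_calculate_min_attempts n → Spec_calculate_min_attempts n (calculate_min_attempts n)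

-- ===== LEMMAS AND PROOFS =====

-- ===== VERDICT (by name: the statement is the Claim_ definition above) =====
-- loop invariant: for positive n the loop returns acc + bit_length n
theorem pvLoopA_eq (m : Nat) : ∀ (n acc : Int), 0 < n → n.toNat = m →
    pvLoopA n acc = acc + (PySem.Int.bitLength n : Int) := by
  induction m using Nat.strong_induction_on with
  | _ m ih =>
    intro n acc hn hm
    rw [pvLoopA]
    simp only [hn, dif_pos]
    have h2 : PySem.Int.floordiv n 2 = n / 2 := PySem.Int.floordiv_eq_ediv_of_pos (by omega)
    have hbl := PySem.Int.bitLength_of_pos (n := n) hn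
    by_cases hh : 0 < n / 2
    · have := ih (n / 2).toNat (by omega) (n / 2) (acc + 1) hh rfl
      rw [h2] at *
      rw [this, hbl]
      push_cast
      ring
    · have hz : n / 2 = 0 := by omega
      have hn1 : n = 1 := by omega
      subst hn1
      rw [pvLoopA]
      norm_num [PySem.Int.floordiv_eq_ediv_of_pos (a := (1:Int)) (b := (2:Int)) (by omega)]
      decide

theorem calculate_min_attempts_spec : Claim_equal_calculate_min_attempts := by
  intro n _
  unfold Spec_calculate_min_attempts calculate_min_attempts calculate_min_attempts_alt
  by_cases h : n ≤ 1
  · simp [h]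
  · simp only [h, if_false]
    rw [pvLoopA_eq n.toNat n 0 (by omega) rfl]
    ring
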